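-- pv_equiv track=rewrite | github.com/demetriusvissarion/PythonExercises | Makers/Middle_Letter/walk.py | ten_minute_walk
-- ===== SOURCE A (Python) =====
-- def ten_minute_walk(directions):
--     if len(directions) != 10:
--         return False
--
--     north_south = 0
--     east_west = 0
--
--     for direction in directions:
--         if direction == 'n':
--             north_south += 1
--         elif direction == 's':
--             north_south -= 1
--         elif direction == 'e':
--             east_west += 1
--         elif direction == 'w':
--             east_west -= 1
--
--     return north_south == 0 and east_west == 0
-- ===== SOURCE B (Python) =====
-- def ten_minute_walk(directions):
--     if len(directions) != 10:
--         return False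
--     opposite = {'n': 's', 's': 'n', 'e': 'w', 'w': 'e'}
--     rest = list(directions)
--     while rest:
--         d = rest.pop(0)
--         if d in opposite:
--             if opposite[d] in rest:
--                 rest.remove(opposite[d])
--             else:
--                 return False
--     return True
-- ===== Notes on version B (the rewrite author's own statement) =====
-- stated objective: alternative
-- what changed: Replaces A's running net-displacement accumulators with a pair-cancellation matcher: each step symbol is matched against and removed with its opposite from the remaining list, succeeding iff every move cancels.
import Mathlib
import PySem

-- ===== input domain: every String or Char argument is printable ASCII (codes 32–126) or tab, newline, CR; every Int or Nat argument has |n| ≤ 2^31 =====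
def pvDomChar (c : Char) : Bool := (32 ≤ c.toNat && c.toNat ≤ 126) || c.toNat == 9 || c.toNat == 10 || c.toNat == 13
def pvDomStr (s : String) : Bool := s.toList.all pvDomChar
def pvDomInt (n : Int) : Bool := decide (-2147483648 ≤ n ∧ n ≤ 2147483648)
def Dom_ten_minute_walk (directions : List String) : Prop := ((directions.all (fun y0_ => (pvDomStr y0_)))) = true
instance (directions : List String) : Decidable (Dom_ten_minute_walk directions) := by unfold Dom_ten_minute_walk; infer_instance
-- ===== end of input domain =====

-- B replaces A's running net-displacement accumulators with a pair-cancellation matcher: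
-- each move is matched against and removed with its opposite from the remaining moves (alternative decomposition).

-- ===== PORT A =====
-- A's loop body: update (north_south, east_west) by one direction, branches in A's order
def ten_minute_walk_step (acc : Int × Int) (direction : String) : Int × Int :=
  if direction == "n" then (acc.1 + 1, acc.2)
  else if direction == "s" then (acc.1 - 1, acc.2)
  else if direction == "e" then (acc.1, acc.2 + 1)
  else if direction == "w" then (acc.1, acc.2 - 1)
  else acc

def ten_minute_walk (directions : List String) : Bool :=
  if directions.length ≠ 10 then false
  else
    let st := directions.foldl ten_minute_walk_step (0, 0)
    st.1 == 0 && st.2 == 0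

-- ===== PORT B =====
-- Source B's dict 'opposite'
def pvOppositeDict : PySem.Dict String String :=
  PySem.Dict.ofList [("n", "s"), ("s", "n"), ("e", "w"), ("w", "e")]

-- Source B's while loop: pop the front move; if it is a direction ('d in opposite' = get? is some),
-- test 'opposite[d] in rest' and remove that first occurrence (list.remove on a member = List.erase,
-- per PySem.List.remove?_eq_some_erase), else return False.
def ten_minute_walk_loop : List String → Bool
  | [] => true
  | d :: rest' =>
    match PySem.Dict.get? pvOppositeDict d with
    | none => ten_minute_walk_loop rest'
    | some o =>
      if hmem : o ∈ rest' then ten_minute_walk_loop (rest'.erase o)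
      else false
termination_by l => l.length
decreasing_by
  · simp
  · have := List.length_erase_of_mem hmem
    simp
    omega

def ten_minute_walk_alt (directions : List String) : Bool :=
  if directions.length ≠ 10 then false
  else ten_minute_walk_loop directions

-- ===== PRECONDITION & SPEC =====
def Spec_ten_minute_walk (directions : List String) (out : Bool) : Prop := out = ten_minute_walk_alt directions
instance (directions : List String) (out : Bool) : Decidable (Spec_ten_minute_walk directions out) := by unfold Spec_ten_minute_walk; infer_instance

-- ===== CLAIM (what is proved, stated in full; the proofs are below) =====
def Claim_equal_ten_minute_walk : Prop := ∀ (directions : List String), Dom_ten_minute_walk directions → Spec_ten_minute_walk directions (ten_minute_walk directions)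

-- ===== LEMMAS AND PROOFS =====
theorem ten_minute_walk_fold (l : List String) (ns ew : Int) :
    l.foldl ten_minute_walk_step (ns, ew)
    = (ns + l.count "n" - l.count "s", ew + l.count "e" - l.count "w") := by
  induction l generalizing ns ew with
  | nil => simp
  | cons x xs ih =>
    rw [List.foldl_cons]
    by_cases hn : x = "n"
    · subst hn
      have hst : ten_minute_walk_step (ns, ew) "n" = (ns + 1, ew) := rfl
      rw [hst, ih]
      simp [Prod.ext_iff]; omega
    · by_cases hs : x = "s"
      · subst hs
        have hst : ten_minute_walk_step (ns, ew) "s" = (ns - 1, ew) := rfl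
        rw [hst, ih]
        simp [Prod.ext_iff]; omega
      · by_cases he : x = "e"
        · subst he
          have hst : ten_minute_walk_step (ns, ew) "e" = (ns, ew + 1) := rfl
          rw [hst, ih]
          simp [Prod.ext_iff]; omega
        · by_cases hw : x = "w"
          · subst hw
            have hst : ten_minute_walk_step (ns, ew) "w" = (ns, ew - 1) := rfl
            rw [hst, ih]
            simp [Prod.ext_iff]; omega
          · rw [show ten_minute_walk_step (ns, ew) x = (ns, ew) from by
              simp [ten_minute_walk_step, hn, hs, he, hw], ih]
            simp [hn, hs, he, hw]

-- the matcher succeeds exactly when opposite moves balance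
theorem loop_cons_none (d : String) (rest : List String)
    (hd : PySem.Dict.get? pvOppositeDict d = none) :
    ten_minute_walk_loop (d :: rest) = ten_minute_walk_loop rest := by
  rw [ten_minute_walk_loop, hd]

theorem loop_cons_mem (d o : String) (rest : List String)
    (hd : PySem.Dict.get? pvOppositeDict d = some o) (hm : o ∈ rest) :
    ten_minute_walk_loop (d :: rest) = ten_minute_walk_loop (rest.erase o) := by
  rw [ten_minute_walk_loop, hd]
  exact dif_pos hm

theorem loop_cons_notmem (d o : String) (rest : List String)
    (hd : PySem.Dict.get? pvOppositeDict d = some o) (hm : o ∉ rest) :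
    ten_minute_walk_loop (d :: rest) = false := by
  rw [ten_minute_walk_loop, hd]
  exact dif_neg hm

theorem ten_minute_walk_loop_eq (n : Nat) :
    ∀ (l : List String), l.length ≤ n →
    ten_minute_walk_loop l
      = (decide (l.count "n" = l.count "s") && decide (l.count "e" = l.count "w")) := by
  induction n with
  | zero =>
    intro l hl
    have : l = [] := List.eq_nil_of_length_eq_zero (Nat.le_zero.mp hl)
    subst this
    simp [ten_minute_walk_loop]
  | succ n ih =>
    intro l hl
    match l with
    | [] => simp [ten_minute_walk_loop]
    | d :: rest =>
      have hr : rest.length ≤ n := by simpa using hl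
      by_cases hn : d = "n"
      · subst hn
        by_cases hm : "s" ∈ rest
        · rw [loop_cons_mem "n" "s" rest (by decide) hm,
            ih _ (by have := List.length_erase_of_mem hm; omega)]
          have h1 : 1 ≤ rest.count "s" := List.one_le_count_iff.mpr hm
          rw [show ∀ a b : Bool, a = b ↔ (a = true ↔ b = true) from by decide]
          simp only [Bool.and_eq_true, decide_eq_true_eq]
          simp [List.count_erase_self, List.count_erase_of_ne] <;> omega
        · rw [loop_cons_notmem "n" "s" rest (by decide) hm]
          have h0 : rest.count "s" = 0 := List.count_eq_zero.mpr hm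
          rw [show ∀ a b : Bool, a = b ↔ (a = true ↔ b = true) from by decide]
          simp <;> omega
      · by_cases hs : d = "s"
        · subst hs
          by_cases hm : "n" ∈ rest
          · rw [loop_cons_mem "s" "n" rest (by decide) hm,
              ih _ (by have := List.length_erase_of_mem hm; omega)]
            have h1 : 1 ≤ rest.count "n" := List.one_le_count_iff.mpr hm
            rw [show ∀ a b : Bool, a = b ↔ (a = true ↔ b = true) from by decide]
            simp only [Bool.and_eq_true, decide_eq_true_eq]
            simp [List.count_erase_self, List.count_erase_of_ne] <;> omega
          · rw [loop_cons_notmem "s" "n" rest (by decide) hm]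
            have h0 : rest.count "n" = 0 := List.count_eq_zero.mpr hm
            rw [show ∀ a b : Bool, a = b ↔ (a = true ↔ b = true) from by decide]
            simp <;> omega
        · by_cases he : d = "e"
          · subst he
            by_cases hm : "w" ∈ rest
            · rw [loop_cons_mem "e" "w" rest (by decide) hm,
                ih _ (by have := List.length_erase_of_mem hm; omega)]
              have h1 : 1 ≤ rest.count "w" := List.one_le_count_iff.mpr hm
              rw [show ∀ a b : Bool, a = b ↔ (a = true ↔ b = true) from by decide]
              simp only [Bool.and_eq_true, decide_eq_true_eq]
              simp [List.count_erase_self, List.count_erase_of_ne] <;> omega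
            · rw [loop_cons_notmem "e" "w" rest (by decide) hm]
              have h0 : rest.count "w" = 0 := List.count_eq_zero.mpr hm
              rw [show ∀ a b : Bool, a = b ↔ (a = true ↔ b = true) from by decide]
              simp <;> omega
          · by_cases hw : d = "w"
            · subst hw
              by_cases hm : "e" ∈ rest
              · rw [loop_cons_mem "w" "e" rest (by decide) hm,
                  ih _ (by have := List.length_erase_of_mem hm; omega)]
                have h1 : 1 ≤ rest.count "e" := List.one_le_count_iff.mpr hm
                rw [show ∀ a b : Bool, a = b ↔ (a = true ↔ b = true) from by decide]
                simp only [Bool.and_eq_true, decide_eq_true_eq]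
                simp [List.count_erase_self, List.count_erase_of_ne] <;> omega
              · rw [loop_cons_notmem "w" "e" rest (by decide) hm]
                have h0 : rest.count "e" = 0 := List.count_eq_zero.mpr hm
                rw [show ∀ a b : Bool, a = b ↔ (a = true ↔ b = true) from by decide]
                simp <;> omega
            · have hg : PySem.Dict.get? pvOppositeDict d = none := by
                simp [pvOppositeDict, PySem.Dict.ofList, PySem.Dict.get?]
                intro a b hab
                rw [show (PySem.Dict.empty.update [("n", "s"), ("s", "n"), ("e", "w"), ("w", "e")] : PySem.Dict String String).items = [("n", "s"), ("s", "n"), ("e", "w"), ("w", "e")] from by decide] at hab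
                simp at hab
                rcases hab with ⟨ha, _⟩ | ⟨ha, _⟩ | ⟨ha, _⟩ | ⟨ha, _⟩ <;> subst ha <;>
                  first
                    | exact fun hh => hn hh.symm
                    | exact fun hh => hs hh.symm
                    | exact fun hh => he hh.symm
                    | exact fun hh => hw hh.symm
              rw [loop_cons_none d rest hg, ih _ hr]
              simp [List.count_cons, hn, hs, he, hw]

-- ===== VERDICT (by name: the statement is the Claim_ definition above) =====
theorem ten_minute_walk_spec : Claim_equal_ten_minute_walk := by
  intro directions _
  unfold Spec_ten_minute_walk ten_minute_walk ten_minute_walk_alt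
  by_cases h : directions.length = 10
  · simp only [h, ne_eq, not_true_eq_false, if_false, ten_minute_walk_fold,
      ten_minute_walk_loop_eq directions.length directions le_rfl]
    rw [show ∀ a b : Bool, a = b ↔ (a = true ↔ b = true) from by decide]
    simp only [Bool.and_eq_true, beq_iff_eq, decide_eq_true_eq]
    omega
  · simp [h]
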